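-- pv_equiv track=rewrite | github.com/JakubKazimierski/PythonPortfolio | Easy/ClosestEnemy/ClosestEnemy.py | ClosestEnemy
-- ===== SOURCE A (Python) =====
-- def ClosestEnemy(arr):
--     '''
--     Have the function ClosestEnemy(arr)
--     take the array of numbers stored in arr
--     and from the position in the array where a 1 is,
--     return the number of spaces either left or right
--     you must move to reach an enemy which is represented by a 2.
--
--     For example: if arr is [0, 0, 1, 0, 0, 2, 0, 2]
--     then your program should return 3 because the closest enemy (2) is 3
--     spaces away from the 1.
--     The array will contain any number of 0's and 2's,
--     but only a single 1. It may not contain any 2's at all as well,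
--     where in that case your program should return a 0.
--     '''
--
--     try:
--
--         closest_enemy_spaces = []
--         go_left = go_right = position_of_one = arr.index(1)
--
--
--         while go_left > 0 :
--             go_left -= 1
--             if arr[go_left] == 2:
--                 closest_enemy_spaces.append(position_of_one - go_left)
--                 break
--
--         while go_right < len(arr)-1 :
--             go_right += 1
--             if arr[go_right] == 2:
--                 closest_enemy_spaces.append(go_right - position_of_one)
--                 break
--
--         if len(closest_enemy_spaces) != 0:
--             return min(closest_enemy_spaces)
--
--         return 0
--
--     except(AttributeError, TypeError):
--         return -1
-- ===== SOURCE B (Python) =====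
-- def ClosestEnemy(arr):
--     try:
--         pos = arr.index(1)
--         distances = [abs(i - pos) for i, x in enumerate(arr) if x == 2]
--         return min(distances) if distances else 0
--     except (AttributeError, TypeError):
--         return -1
-- ===== Notes on version B (the rewrite author's own statement) =====
-- stated objective: simpler
-- what changed: Replaces the two early-breaking directional while-loops (scan left, scan right, collect up to two candidates, min) with a single uniform comprehension over the whole array collecting absolute distances to every 2, then min-or-0.
import Mathlib
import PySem

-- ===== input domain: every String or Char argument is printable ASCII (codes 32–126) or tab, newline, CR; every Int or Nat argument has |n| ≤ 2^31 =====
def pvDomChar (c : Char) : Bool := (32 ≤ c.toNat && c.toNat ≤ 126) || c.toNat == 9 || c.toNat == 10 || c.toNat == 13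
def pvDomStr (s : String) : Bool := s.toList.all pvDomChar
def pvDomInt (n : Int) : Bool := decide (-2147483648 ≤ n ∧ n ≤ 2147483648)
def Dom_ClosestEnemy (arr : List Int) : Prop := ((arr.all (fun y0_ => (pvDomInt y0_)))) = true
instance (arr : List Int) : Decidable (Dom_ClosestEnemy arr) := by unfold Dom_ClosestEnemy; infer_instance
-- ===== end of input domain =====

-- B replaces A's two early-breaking directional while-loops with one uniform pass
-- collecting absolute distances to every 2, then min-or-0 (objective: simpler).

-- ===== PORT A =====
-- 'while go_left > 0: go_left -= 1; if arr[go_left] == 2: append(pos - go_left); break'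
-- (returns 'some appended_value', 'none' when nothing was appended); recursion on go_left.
def pvLeftLoop (arr : List Int) (pos : Nat) : Nat → Option Int
  | 0 => none
  | Nat.succ g =>
    if PySem.List.pyGet? arr ((g : Nat) : Int) = some 2 then some ((pos : Int) - (g : Int))
    else pvLeftLoop arr pos g

-- 'while go_right < len(arr)-1: go_right += 1; if arr[go_right] == 2: append(go_right - pos); break'
def pvRightLoop (arr : List Int) (pos : Nat) (g : Nat) : Option Int :=
  if g < arr.length - 1 then
    if PySem.List.pyGet? arr (((g + 1 : Nat)) : Int) = some 2 then some (((g + 1 : Nat) : Int) - (pos : Int))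
    else pvRightLoop arr pos (g + 1)
  else none
termination_by arr.length - g

def ClosestEnemy (arr : List Int) : Int :=
  match PySem.List.index? arr 1 with
  | none => 0  -- Python raises ValueError here; excluded by Pre_ClosestEnemy
  | some pos =>
    let ces1 : List Int := match pvLeftLoop arr pos pos with | some d => [d] | none => []
    let ces : List Int := ces1 ++ (match pvRightLoop arr pos pos with | some d => [d] | none => [])
    if ces.length ≠ 0 then (PySem.List.min? ces (fun y => y)).getD 0 else 0

-- ===== PORT B =====
def ClosestEnemy_alt (arr : List Int) : Int :=
  match PySem.List.index? arr 1 with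
  | none => 0  -- Python raises ValueError here; excluded by Pre_ClosestEnemy
  | some pos =>
    let distances : List Int :=
      (PySem.List.enumerate arr 0).filterMap
        (fun p => if p.2 = 2 then some |p.1 - (pos : Int)| else none)
    if distances ≠ [] then (PySem.List.min? distances (fun y => y)).getD 0 else 0

-- ===== PRECONDITION & SPEC =====
-- Pre_ excludes exactly the inputs containing no 1, on which arr.index(1) raises ValueError in both A and B.
def Pre_ClosestEnemy (arr : List Int) : Prop := 1 ∈ arr
instance (arr : List Int) : Decidable (Pre_ClosestEnemy arr) := by unfold Pre_ClosestEnemy; infer_instance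
def pvWitness_ClosestEnemy : List Int := [0, 1, 0, 2]

def Spec_ClosestEnemy (arr : List Int) (out : Int) : Prop := out = ClosestEnemy_alt arr
instance (arr : List Int) (out : Int) : Decidable (Spec_ClosestEnemy arr out) := by unfold Spec_ClosestEnemy; infer_instance

-- ===== CLAIM (what is proved, stated in full; the proofs are below) =====
def Claim_equal_ClosestEnemy : Prop := ∀ (arr : List Int), Dom_ClosestEnemy arr → Pre_ClosestEnemy arr → Spec_ClosestEnemy arr (ClosestEnemy arr)

-- ===== LEMMAS AND PROOFS =====

lemma pvLeftLoop_none {arr : List Int} {pos : Nat} : ∀ {g : Nat}, g ≤ arr.length →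
    (pvLeftLoop arr pos g = none ↔ ∀ j (_ : j < g) (hj : j < arr.length), arr[j] ≠ 2) := by
  intro g
  induction g with
  | zero =>
    intro _
    constructor
    · intro _ j hj _; omega
    · intro _; rfl
  | succ g ih =>
    intro hg
    have hgl : g < arr.length := hg
    have hget : PySem.List.pyGet? arr ((g : Nat) : Int) = some arr[g] := by
      simp [List.getElem?_eq_getElem hgl]
    by_cases h2 : arr[g] = 2
    · simp only [pvLeftLoop, hget, h2]
      constructor
      · intro h; cases h
      · intro h; exact absurd h2 (h g (by omega) hgl)
    · have hne : ¬ (some arr[g] = some (2:Int)) := by simpa using h2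
      simp only [pvLeftLoop, hget, if_neg hne]
      rw [ih (by omega)]
      constructor
      · intro h j hj hjl
        rcases Nat.lt_succ_iff_lt_or_eq.mp hj with h' | h'
        · exact h j h' hjl
        · subst h'; exact h2
      · intro h j hj hjl; exact h j (by omega) hjl

lemma pvLeftLoop_some {arr : List Int} {pos : Nat} : ∀ {g : Nat}, g ≤ arr.length → ∀ {d : Int},
    pvLeftLoop arr pos g = some d →
    ∃ j, ∃ hj : j < arr.length, j < g ∧ arr[j] = 2 ∧ d = (pos : Int) - (j : Int) ∧
      ∀ k (hk : k < arr.length), j < k → k < g → arr[k] ≠ 2 := by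
  intro g
  induction g with
  | zero => intro _ d h; cases h
  | succ g ih =>
    intro hg d h
    have hgl : g < arr.length := hg
    have hget : PySem.List.pyGet? arr ((g : Nat) : Int) = some arr[g] := by
      simp [List.getElem?_eq_getElem hgl]
    by_cases h2 : arr[g] = 2
    · have hd : d = (pos : Int) - (g : Int) := by
        simp [pvLeftLoop, hget, h2] at h; omega
      exact ⟨g, hgl, by omega, h2, hd, fun k hk h1 h2 => by omega⟩
    · have hne : ¬ (some arr[g] = some (2:Int)) := by simpa using h2
      simp only [pvLeftLoop, hget, if_neg hne] at h
      obtain ⟨j, hj, hjg, hj2, hd, hmax⟩ := ih (by omega) h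
      refine ⟨j, hj, by omega, hj2, hd, ?_⟩
      intro k hk hjk hkg
      rcases Nat.lt_succ_iff_lt_or_eq.mp hkg with h' | h'
      · exact hmax k hk hjk h'
      · subst h'; exact h2


lemma pvRightLoop_none {arr : List Int} {pos : Nat} : ∀ {g : Nat},
    (pvRightLoop arr pos g = none ↔ ∀ j (hj : j < arr.length), g < j → arr[j] ≠ 2) := by
  suffices H : ∀ n g, arr.length - g ≤ n → (pvRightLoop arr pos g = none ↔ ∀ j (hj : j < arr.length), g < j → arr[j] ≠ 2) from
    fun {g} => H _ g le_rfl
  intro n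
  induction n with
  | zero =>
    intro g hg
    have hlt : ¬ g < arr.length - 1 := by omega
    rw [pvRightLoop, if_neg hlt]
    constructor
    · intro _ j hj hgj; omega
    · intro _; rfl
  | succ n ih =>
    intro g hg
    by_cases hlt : g < arr.length - 1
    · have hgl : g + 1 < arr.length := by omega
      have hget : PySem.List.pyGet? arr (((g + 1 : Nat)) : Int) = some arr[g+1] := by
        simp only [PySem.List.pyGet?_natCast]
        exact List.getElem?_eq_getElem hgl
      rw [pvRightLoop, if_pos hlt, hget]
      by_cases h2 : arr[g+1] = 2
      · rw [if_pos (by simp [h2])]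
        constructor
        · intro h; cases h
        · intro h; exact absurd h2 (h (g+1) hgl (by omega))
      · rw [if_neg (by simpa using h2)]
        rw [ih (g+1) (by omega)]
        constructor
        · intro h j hj hgj
          rcases Nat.lt_or_ge (g+1) j with h' | h'
          · exact h j hj h'
          · have : j = g + 1 := by omega
            subst this; exact h2
        · intro h j hj hgj; exact h j hj (by omega)
    · rw [pvRightLoop, if_neg hlt]
      constructor
      · intro _ j hj hgj; omega
      · intro _; rfl

lemma pvRightLoop_some {arr : List Int} {pos : Nat} : ∀ {g : Nat} {d : Int},
    pvRightLoop arr pos g = some d →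
    ∃ j, ∃ hj : j < arr.length, g < j ∧ arr[j] = 2 ∧ d = (j : Int) - (pos : Int) ∧
      ∀ k (hk : k < arr.length), g < k → k < j → arr[k] ≠ 2 := by
  suffices H : ∀ n g d, arr.length - g ≤ n → pvRightLoop arr pos g = some d →
      ∃ j, ∃ hj : j < arr.length, g < j ∧ arr[j] = 2 ∧ d = (j : Int) - (pos : Int) ∧
        ∀ k (hk : k < arr.length), g < k → k < j → arr[k] ≠ 2 from
    fun {g d} h => H _ g d le_rfl h
  intro n
  induction n with
  | zero =>
    intro g d hg h
    rw [pvRightLoop, if_neg (by omega)] at h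
    cases h
  | succ n ih =>
    intro g d hg h
    by_cases hlt : g < arr.length - 1
    · have hgl : g + 1 < arr.length := by omega
      have hget : PySem.List.pyGet? arr (((g + 1 : Nat)) : Int) = some arr[g+1] := by
        simp only [PySem.List.pyGet?_natCast]
        exact List.getElem?_eq_getElem hgl
      rw [pvRightLoop, if_pos hlt, hget] at h
      by_cases h2 : arr[g+1] = 2
      · rw [if_pos (by simp [h2]), Option.some.injEq] at h
        exact ⟨g+1, hgl, by omega, h2, h.symm, fun k hk h1 h2 => by omega⟩
      · rw [if_neg (by simpa using h2)] at h
        obtain ⟨j, hj, hjg, hj2, hd, hmin⟩ := ih (g+1) d (by omega) h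
        refine ⟨j, hj, by omega, hj2, hd, ?_⟩
        intro k hk hgk hkj
        rcases Nat.lt_or_ge (g+1) k with h' | h'
        · exact hmin k hk h' hkj
        · have : k = g + 1 := by omega
          subst this; exact h2
    · rw [pvRightLoop, if_neg hlt] at h
      cases h

lemma pv_mem_distances_aux (q : Int) : ∀ (arr : List Int) (s d : Int),
    (d ∈ (PySem.List.enumerate arr s).filterMap
        (fun p => if p.2 = 2 then some |p.1 - q| else none)
    ↔ ∃ i : Nat, ∃ hi : i < arr.length, arr[i] = 2 ∧ d = |s + (i : Int) - q|) := by
  intro arr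
  induction arr with
  | nil => intro s d; simp [PySem.List.enumerate_nil]
  | cons x xs ih =>
    intro s d
    rw [PySem.List.enumerate_cons, List.filterMap_cons]
    by_cases h2 : x = 2
    · have hf : (if ((s, x) : Int × Int).2 = 2 then some |((s, x) : Int × Int).1 - q| else none)
          = some |s - q| := by simp [h2]
      rw [hf]
      simp only [List.mem_cons, ih]
      constructor
      · rintro (h | ⟨i, hi, hx, hd⟩)
        · exact ⟨0, by simp, by simpa using h2, by simpa using h⟩
        · refine ⟨i+1, by simp; omega, by simpa using hx, ?_⟩
          rw [hd]; congr 1; push_cast; ring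
      · rintro ⟨i, hi, hx, hd⟩
        cases i with
        | zero => left; simpa using hd
        | succ i =>
          right
          refine ⟨i, by simpa using hi, by simpa using hx, ?_⟩
          rw [hd]; congr 1; push_cast; ring
    · have hf : (if ((s, x) : Int × Int).2 = 2 then some |((s, x) : Int × Int).1 - q| else none)
          = none := by simp [h2]
      rw [hf]
      simp only [ih]
      constructor
      · rintro ⟨i, hi, hx, hd⟩
        refine ⟨i+1, by simp; omega, by simpa using hx, ?_⟩
        rw [hd]; congr 1; push_cast; ring
      · rintro ⟨i, hi, hx, hd⟩
        cases i with
        | zero => exact absurd (by simpa using hx) h2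
        | succ i =>
          refine ⟨i, by simpa using hi, by simpa using hx, ?_⟩
          rw [hd]; congr 1; push_cast; ring

theorem pv_main (arr : List Int) (hmem : (1:Int) ∈ arr) :
    ClosestEnemy arr = ClosestEnemy_alt arr := by
  have hs : (PySem.List.index? arr 1).isSome := by
    rw [PySem.List.index?_isSome_iff]; exact hmem
  obtain ⟨pos, hpos⟩ := Option.isSome_iff_exists.mp hs
  obtain ⟨hposlt, hget1, -⟩ := PySem.List.getElem_of_index?_eq_some hpos
  set D : List Int := (PySem.List.enumerate arr 0).filterMap
      (fun p => if p.2 = 2 then some |p.1 - (pos : Int)| else none) with hD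
  have hmemD : ∀ d : Int, d ∈ D ↔ ∃ i : Nat, ∃ hi : i < arr.length, arr[i] = 2 ∧ d = |(i : Int) - (pos : Int)| := by
    intro d
    rw [hD, pv_mem_distances_aux]
    simp only [zero_add]
  simp only [ClosestEnemy, ClosestEnemy_alt, hpos, ← hD]
  rcases hl : pvLeftLoop arr pos pos with _ | a <;> rcases hr : pvRightLoop arr pos pos with _ | b
  · -- none, none: no 2 anywhere
    have hno2 : ∀ i (hi : i < arr.length), arr[i] ≠ 2 := by
      intro i hi
      rcases lt_trichotomy i pos with h | h | h
      · exact (pvLeftLoop_none hposlt.le).mp hl i h hi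
      · subst h; rw [hget1]; decide
      · exact pvRightLoop_none.mp hr i hi h
    have hDnil : D = [] := by
      rw [List.eq_nil_iff_forall_not_mem]
      intro d hd
      obtain ⟨i, hi, h2, -⟩ := (hmemD d).mp hd
      exact hno2 i hi h2
    simp [hDnil]
  · -- left none, right some b
    obtain ⟨jr, hjr, hjrgt, hjr2, hb, hminr⟩ := pvRightLoop_some hr
    have hln := (pvLeftLoop_none hposlt.le).mp hl
    have hbD : b ∈ D := by
      rw [hmemD]
      refine ⟨jr, hjr, hjr2, ?_⟩
      rw [hb, abs_of_nonneg]
      have : (pos : Int) < (jr : Int) := by exact_mod_cast hjrgt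
      omega
    have hDne : D ≠ [] := fun h => by simp [h] at hbD
    obtain ⟨m, hm⟩ : ∃ m, PySem.List.min? D (fun y : Int => y) = some m := by
      rcases hcase : PySem.List.min? D (fun y : Int => y) with _ | m
      · exact absurd ((PySem.List.min?_eq_none_iff _ _).mp hcase) hDne
      · exact ⟨m, rfl⟩
    have hmmem := PySem.List.min?_mem hm
    have hmmin := PySem.List.min?_isMin hm
    have hmb : m ≤ b := hmmin b hbD
    have hbm : b ≤ m := by
      obtain ⟨i, hi, hi2, hmi⟩ := (hmemD m).mp hmmem
      have hip : i ≠ pos := fun h => by subst h; rw [hget1] at hi2; cases hi2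
      rcases Nat.lt_or_ge i pos with h | h
      · exact absurd hi2 (hln i h hi)
      · have hipos : pos < i := by omega
        have hjri : jr ≤ i := by
          by_contra hc
          exact (hminr i hi hipos (by omega)) hi2
        have : (jr : Int) ≤ (i : Int) := by exact_mod_cast hjri
        have hp : (pos : Int) < (i : Int) := by exact_mod_cast hipos
        rw [hmi, hb, abs_of_nonneg (by omega)]
        omega
    have hmeq : m = b := le_antisymm hmb hbm
    simp [hm, hmeq, hDne, PySem.List.min?_id_cons]
  · -- left some a, right none
    obtain ⟨jl, hjl, hjllt, hjl2, ha, hmaxl⟩ := pvLeftLoop_some hposlt.le hl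
    have hrn := pvRightLoop_none.mp hr
    have haD : a ∈ D := by
      rw [hmemD]
      refine ⟨jl, hjl, hjl2, ?_⟩
      rw [ha, abs_sub_comm, abs_of_nonneg]
      have : (jl : Int) < (pos : Int) := by exact_mod_cast hjllt
      omega
    have hDne : D ≠ [] := fun h => by simp [h] at haD
    obtain ⟨m, hm⟩ : ∃ m, PySem.List.min? D (fun y : Int => y) = some m := by
      rcases hcase : PySem.List.min? D (fun y : Int => y) with _ | m
      · exact absurd ((PySem.List.min?_eq_none_iff _ _).mp hcase) hDne
      · exact ⟨m, rfl⟩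
    have hmmem := PySem.List.min?_mem hm
    have hmmin := PySem.List.min?_isMin hm
    have hma : m ≤ a := hmmin a haD
    have ham : a ≤ m := by
      obtain ⟨i, hi, hi2, hmi⟩ := (hmemD m).mp hmmem
      have hip : i ≠ pos := fun h => by subst h; rw [hget1] at hi2; cases hi2
      rcases Nat.lt_or_ge pos i with h | h
      · exact absurd hi2 (hrn i hi h)
      · have hipos : i < pos := by omega
        have hjli : i ≤ jl := by
          by_contra hc
          exact (hmaxl i hi (by omega) hipos) hi2
        have : (i : Int) ≤ (jl : Int) := by exact_mod_cast hjli
        have hp : (i : Int) < (pos : Int) := by exact_mod_cast hipos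
        rw [hmi, ha, abs_sub_comm, abs_of_nonneg (by omega)]
        omega
    have hmeq : m = a := le_antisymm hma ham
    simp [hm, hmeq, hDne, PySem.List.min?_id_cons]
  · -- both some
    obtain ⟨jl, hjl, hjllt, hjl2, ha, hmaxl⟩ := pvLeftLoop_some hposlt.le hl
    obtain ⟨jr, hjr, hjrgt, hjr2, hb, hminr⟩ := pvRightLoop_some hr
    have haD : a ∈ D := by
      rw [hmemD]
      refine ⟨jl, hjl, hjl2, ?_⟩
      rw [ha, abs_sub_comm, abs_of_nonneg]
      have : (jl : Int) < (pos : Int) := by exact_mod_cast hjllt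
      omega
    have hbD : b ∈ D := by
      rw [hmemD]
      refine ⟨jr, hjr, hjr2, ?_⟩
      rw [hb, abs_of_nonneg]
      have : (pos : Int) < (jr : Int) := by exact_mod_cast hjrgt
      omega
    have hDne : D ≠ [] := fun h => by simp [h] at haD
    obtain ⟨m, hm⟩ : ∃ m, PySem.List.min? D (fun y : Int => y) = some m := by
      rcases hcase : PySem.List.min? D (fun y : Int => y) with _ | m
      · exact absurd ((PySem.List.min?_eq_none_iff _ _).mp hcase) hDne
      · exact ⟨m, rfl⟩
    have hmmem := PySem.List.min?_mem hm
    have hmmin := PySem.List.min?_isMin hm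
    have hma : m ≤ a := hmmin a haD
    have hmb : m ≤ b := hmmin b hbD
    have hlow : min a b ≤ m := by
      obtain ⟨i, hi, hi2, hmi⟩ := (hmemD m).mp hmmem
      have hip : i ≠ pos := fun h => by subst h; rw [hget1] at hi2; cases hi2
      rcases Nat.lt_or_ge i pos with h | h
      · have hjli : i ≤ jl := by
          by_contra hc
          exact (hmaxl i hi (by omega) h) hi2
        have h1 : (i : Int) ≤ (jl : Int) := by exact_mod_cast hjli
        have h2 : (i : Int) < (pos : Int) := by exact_mod_cast h
        have : a ≤ m := by
          rw [hmi, ha, abs_sub_comm, abs_of_nonneg (by omega)]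
          omega
        exact le_trans (min_le_left _ _) this
      · have hipos : pos < i := by omega
        have hjri : jr ≤ i := by
          by_contra hc
          exact (hminr i hi hipos (by omega)) hi2
        have h1 : (jr : Int) ≤ (i : Int) := by exact_mod_cast hjri
        have h2 : (pos : Int) < (i : Int) := by exact_mod_cast hipos
        have : b ≤ m := by
          rw [hmi, hb, abs_of_nonneg (by omega)]
          omega
        exact le_trans (min_le_right _ _) this
    have hmeq : m = min a b := le_antisymm (le_min hma hmb) hlow
    simp [hm, hmeq, hDne, PySem.List.min?_id_cons]

-- ===== VERDICT (by name: the statement is the Claim_ definition above) =====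
theorem ClosestEnemy_spec : Claim_equal_ClosestEnemy := by
  intro arr _ hmem
  unfold Spec_ClosestEnemy
  exact pv_main arr hmem
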